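-- pv_equiv track=rewrite | github.com/pskirank/Beach_Sum | Solved_Kata_7_Kyu_Beach_sum.py | sum_of_a_beach
-- ===== SOURCE A (Python) =====
-- def sum_of_a_beach(beach):
--
-- 	beach = beach.lower()
-- 	match = ["Sand","Water","Fish","Sun"]
-- 	match2 = []
-- 	results = []
-- 	summation = 0
-- 	for x in match:
-- 		match2.append(x.lower())
-- 	for j in match2:
-- 		results.append(beach.count(j))
--
-- 	for i in results:
-- 		summation += i
-- 	return summation
-- ===== SOURCE B (Python) =====
-- def sum_of_a_beach(beach):
--     s = beach.lower()
--     return sum(1 for i in range(len(s)) if s.startswith(("sand", "water", "fish", "sun"), i))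
-- ===== Notes on version B (the rewrite author's own statement) =====
-- stated objective: alternative
-- what changed: Replaces four separate full-string .count scans (plus the list-building loops) with a single left-to-right pass that counts positions where any keyword starts, via str.startswith with a tuple; equal because the keywords never self-overlap and no keyword is a prefix of another.
import Mathlib
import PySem

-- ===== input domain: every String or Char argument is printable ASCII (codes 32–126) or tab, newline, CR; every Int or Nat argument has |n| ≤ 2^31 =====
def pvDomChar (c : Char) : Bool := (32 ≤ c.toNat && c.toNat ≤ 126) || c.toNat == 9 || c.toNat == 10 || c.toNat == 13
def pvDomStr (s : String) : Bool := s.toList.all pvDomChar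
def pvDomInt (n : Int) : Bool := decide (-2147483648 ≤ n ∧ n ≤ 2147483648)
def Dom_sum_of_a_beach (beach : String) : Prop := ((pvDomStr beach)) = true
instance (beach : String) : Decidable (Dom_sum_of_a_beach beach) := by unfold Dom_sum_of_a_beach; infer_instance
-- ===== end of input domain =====

-- B replaces A's four separate .count scans with one combined left-to-right scan; alternative decomposition, same result.

-- ===== PORT A =====
def sum_of_a_beach (beach : String) : Int :=
  let beach := PySem.Str.lower beach
  let mtch : List String := ["Sand", "Water", "Fish", "Sun"]
  let match2 : List String := mtch.foldl (fun acc x => acc ++ [PySem.Str.lower x]) []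
  let results : List Int := match2.foldl (fun acc j => acc ++ [(PySem.Str.count beach j : Int)]) []
  results.foldl (fun summation i => summation + i) 0

-- ===== PORT B =====
def sum_of_a_beach_alt (beach : String) : Int :=
  let s := (PySem.Str.lower beach).toList
  (((List.range s.length).countP (fun i =>
      ["sand".toList, "water".toList, "fish".toList, "sun".toList].any
        (fun k => k.isPrefixOf (s.drop i)))) : Int)

-- ===== PRECONDITION & SPEC =====
def Spec_sum_of_a_beach (beach : String) (out : Int) : Prop := out = sum_of_a_beach_alt beach
instance (beach : String) (out : Int) : Decidable (Spec_sum_of_a_beach beach out) := by unfold Spec_sum_of_a_beach; infer_instance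

-- ===== CLAIM (what is proved, stated in full; the proofs are below) =====
def Claim_equal_sum_of_a_beach : Prop := ∀ (beach : String), Dom_sum_of_a_beach beach → Spec_sum_of_a_beach beach (sum_of_a_beach beach)

-- ===== LEMMAS AND PROOFS =====

-- number of positions (over all suffixes) at which predicate p holds
def pvOccP (p : List Char → Bool) : List Char → Nat
  | [] => 0
  | h :: t => (if p (h :: t) then 1 else 0) + pvOccP p t

-- the keyword never matches itself shifted: every later char differs from the first
def pvNoOv (sub : List Char) : Prop := ∀ k, 0 < k → k < sub.length → sub[k]? ≠ sub[0]?

theorem pvCountP_range_drop (p : List Char → Bool) (l : List Char) :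
    (List.range l.length).countP (fun i => p (l.drop i)) = pvOccP p l := by
  induction l with
  | nil => simp [pvOccP]
  | cons h t ih =>
    simp only [List.length_cons, List.range_succ_eq_map, List.countP_cons, List.countP_map,
      pvOccP, List.drop_zero]
    simp only [Function.comp_def, List.drop_succ_cons]
    rw [ih]
    exact Nat.add_comm _ _

theorem pvNo_match_inside {sub l : List Char} (h : sub <+: l) (hno : pvNoOv sub)
    {k : Nat} (hk : 0 < k) (hk2 : k < sub.length) : ¬ sub <+: l.drop k := by
  obtain ⟨r, rfl⟩ := h
  intro h2
  rw [List.drop_append_of_le_length (by omega)] at h2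
  obtain ⟨r2, hr2⟩ := h2
  have hgd : (List.drop k sub ++ r)[0]? = sub[0]? := by
    rw [← hr2]
    exact List.getElem?_append_left (by omega)
  have h1 : (List.drop k sub ++ r)[0]? = sub[k]? := by
    rw [List.getElem?_append_left (by simp; omega), List.getElem?_drop, Nat.add_zero]
  exact hno k hk hk2 (h1 ▸ hgd)

theorem pvOccP_drop (p : List Char → Bool) :
    ∀ (d : Nat) (l : List Char), (∀ k, k < d → p (l.drop k) = false) →
      pvOccP p l = pvOccP p (l.drop d) := by
  intro d
  induction d with
  | zero => intro l _; simp
  | succ d ih =>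
    intro l hfail
    cases l with
    | nil => simp
    | cons h t =>
      have h0 : p (h :: t) = false := by simpa using hfail 0 (by omega)
      simp only [pvOccP, h0, List.drop_succ_cons]
      simpa using ih t (fun k hk => by simpa using hfail (k + 1) (by omega))

theorem pvOccP_skip {sub l : List Char} (hne : sub ≠ []) (hno : pvNoOv sub)
    (hpre : sub <+: l) :
    pvOccP (fun t => sub.isPrefixOf t) l = 1 + pvOccP (fun t => sub.isPrefixOf t) (l.drop sub.length) := by
  cases l with
  | nil => exact absurd (List.prefix_nil.mp hpre) hne
  | cons h t =>
    have hp : sub.isPrefixOf (h :: t) = true := List.isPrefixOf_iff_prefix.mpr hpre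
    simp only [pvOccP, hp, if_true]
    have hlen : 0 < sub.length := List.length_pos_iff.mpr hne
    have : pvOccP (fun t => sub.isPrefixOf t) t
        = pvOccP (fun t => sub.isPrefixOf t) (t.drop (sub.length - 1)) := by
      refine pvOccP_drop _ (sub.length - 1) t (fun k hk => ?_)
      have : ¬ sub <+: (h :: t).drop (k + 1) :=
        pvNo_match_inside hpre hno (by omega) (by omega)
      exact Bool.eq_false_iff.mpr (fun hh => this (List.isPrefixOf_iff_prefix.mp hh))
    rw [this]
    have hdrop : t.drop (sub.length - 1) = (h :: t).drop sub.length := by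
      cases hsl : sub.length with
      | zero => omega
      | succ n => simp [List.drop_succ_cons]
    rw [hdrop]

theorem pvGo_spec {sub : List Char} (hne : sub ≠ []) (hno : pvNoOv sub) :
    ∀ (fuel : Nat) (l : List Char) (acc : Nat), l.length ≤ fuel →
      PySem.Chars.count.go sub fuel l acc = acc + pvOccP (fun t => sub.isPrefixOf t) l := by
  intro fuel
  induction fuel with
  | zero =>
    intro l acc hl
    have : l = [] := List.length_eq_zero_iff.mp (by omega)
    subst this
    simp [PySem.Chars.count.go, pvOccP]
  | succ fuel ih =>
    intro l acc hl
    cases l with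
    | nil => simp [PySem.Chars.count.go, pvOccP]
    | cons h t =>
      by_cases hp : sub.isPrefixOf (h :: t) = true
      · rw [show PySem.Chars.count.go sub (fuel + 1) (h :: t) acc
            = PySem.Chars.count.go sub fuel (List.drop sub.length (h :: t)) (acc + 1) by
          simp [PySem.Chars.count.go, hp]]
        have hlen : 0 < sub.length := List.length_pos_iff.mpr hne
        rw [ih _ _ (by simp only [List.length_drop, List.length_cons] at hl ⊢; omega)]
        rw [pvOccP_skip hne hno (List.isPrefixOf_iff_prefix.mp hp)]
        omega
      · rw [show PySem.Chars.count.go sub (fuel + 1) (h :: t) acc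
            = PySem.Chars.count.go sub fuel t acc by
          simp [PySem.Chars.count.go, hp]]
        rw [ih _ _ (by simp at hl ⊢; omega)]
        simp [pvOccP, hp]

theorem pvCount_eq_occ {sub : List Char} (hne : sub ≠ []) (hno : pvNoOv sub) (l : List Char) :
    PySem.Chars.count l sub = pvOccP (fun t => sub.isPrefixOf t) l := by
  unfold PySem.Chars.count
  rw [if_neg (by simpa [List.isEmpty_iff] using hne)]
  simpa using pvGo_spec hne hno l.length l 0 (le_refl _)

theorem pvOccP_or (p q : List Char → Bool) (hdisj : ∀ t, p t = true → q t = false)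
    (l : List Char) : pvOccP (fun t => p t || q t) l = pvOccP p l + pvOccP q l := by
  induction l with
  | nil => simp [pvOccP]
  | cons h t ih =>
    simp only [pvOccP, ih]
    by_cases hp : p (h :: t) = true
    · have := hdisj _ hp
      simp [hp, this]
      omega
    · simp only [Bool.not_eq_true] at hp
      simp [hp]
      omega

theorem pvPref_disj {a b : List Char} (h1 : ¬ a <+: b) (h2 : ¬ b <+: a) :
    ∀ t, a.isPrefixOf t = true → b.isPrefixOf t = false := by
  intro t ha
  by_contra hb
  simp only [Bool.not_eq_false] at hb
  rcases List.prefix_or_prefix_of_prefix (List.isPrefixOf_iff_prefix.mp ha) (List.isPrefixOf_iff_prefix.mp hb)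
    with h | h
  · exact h1 h
  · exact h2 h

-- ===== VERDICT (by name: the statement is the Claim_ definition above) =====
theorem sum_of_a_beach_spec : Claim_equal_sum_of_a_beach := by
  intro beach _
  unfold Spec_sum_of_a_beach sum_of_a_beach sum_of_a_beach_alt
  simp only [List.foldl_cons, List.foldl_nil, List.nil_append, List.cons_append, zero_add]
  set L : List Char := (PySem.Str.lower beach).toList with hL
  have e1 : PySem.Str.count (PySem.Str.lower beach) (PySem.Str.lower "Sand")
      = PySem.Chars.count L ['s','a','n','d'] := by
    simp [PySem.Str.count_eq, hL]
    rw [show PySem.Chars.lower ['S','a','n','d'] = ['s','a','n','d'] by decide]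
  have e2 : PySem.Str.count (PySem.Str.lower beach) (PySem.Str.lower "Water")
      = PySem.Chars.count L ['w','a','t','e','r'] := by
    simp [PySem.Str.count_eq, hL]
    rw [show PySem.Chars.lower ['W','a','t','e','r'] = ['w','a','t','e','r'] by decide]
  have e3 : PySem.Str.count (PySem.Str.lower beach) (PySem.Str.lower "Fish")
      = PySem.Chars.count L ['f','i','s','h'] := by
    simp [PySem.Str.count_eq, hL]
    rw [show PySem.Chars.lower ['F','i','s','h'] = ['f','i','s','h'] by decide]
  have e4 : PySem.Str.count (PySem.Str.lower beach) (PySem.Str.lower "Sun")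
      = PySem.Chars.count L ['s','u','n'] := by
    simp [PySem.Str.count_eq, hL]
    rw [show PySem.Chars.lower ['S','u','n'] = ['s','u','n'] by decide]
  rw [e1, e2, e3, e4]
  rw [show ("sand".toList : List Char) = ['s','a','n','d'] from rfl,
      show ("water".toList : List Char) = ['w','a','t','e','r'] from rfl,
      show ("fish".toList : List Char) = ['f','i','s','h'] from rfl,
      show ("sun".toList : List Char) = ['s','u','n'] from rfl]
  rw [pvCountP_range_drop (fun t =>
    [['s','a','n','d'], ['w','a','t','e','r'], ['f','i','s','h'], ['s','u','n']].any
      (fun k => k.isPrefixOf t)) L]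
  have no1 : pvNoOv ['s','a','n','d'] := by
    intro k hk hk2; simp at hk2; interval_cases k <;> decide
  have no2 : pvNoOv ['w','a','t','e','r'] := by
    intro k hk hk2; simp at hk2; interval_cases k <;> decide
  have no3 : pvNoOv ['f','i','s','h'] := by
    intro k hk hk2; simp at hk2; interval_cases k <;> decide
  have no4 : pvNoOv ['s','u','n'] := by
    intro k hk hk2; simp at hk2; interval_cases k <;> decide
  rw [pvCount_eq_occ (by decide) no1 L, pvCount_eq_occ (by decide) no2 L,
      pvCount_eq_occ (by decide) no3 L, pvCount_eq_occ (by decide) no4 L]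
  have step1 := pvOccP_or (fun t => List.isPrefixOf ['s','a','n','d'] t)
    (fun t => List.isPrefixOf ['w','a','t','e','r'] t
      || (List.isPrefixOf ['f','i','s','h'] t || List.isPrefixOf ['s','u','n'] t))
    (fun t h => by
      have hw := pvPref_disj (a := ['s','a','n','d']) (b := ['w','a','t','e','r'])
        (by decide) (by decide) t h
      have hf := pvPref_disj (a := ['s','a','n','d']) (b := ['f','i','s','h'])
        (by decide) (by decide) t h
      have hs := pvPref_disj (a := ['s','a','n','d']) (b := ['s','u','n'])
        (by decide) (by decide) t h
      simp [hw, hf, hs]) L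
  have step2 := pvOccP_or (fun t => List.isPrefixOf ['w','a','t','e','r'] t)
    (fun t => List.isPrefixOf ['f','i','s','h'] t || List.isPrefixOf ['s','u','n'] t)
    (fun t h => by
      have hf := pvPref_disj (a := ['w','a','t','e','r']) (b := ['f','i','s','h'])
        (by decide) (by decide) t h
      have hs := pvPref_disj (a := ['w','a','t','e','r']) (b := ['s','u','n'])
        (by decide) (by decide) t h
      simp [hf, hs]) L
  have step3 := pvOccP_or (fun t => List.isPrefixOf ['f','i','s','h'] t)
    (fun t => List.isPrefixOf ['s','u','n'] t)
    (fun t h => pvPref_disj (a := ['f','i','s','h']) (b := ['s','u','n'])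
      (by decide) (by decide) t h) L
  simp only [List.any_cons, List.any_nil, Bool.or_false] at step1 step2 step3 ⊢
  rw [step1, step2, step3]
  push_cast
  ring
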